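-- pv_equiv track=rewrite | github.com/drydev-code/chronicle | satellites/shared/python/chronicle_satellite/executors/database.py | replace_semicolons_in_literals
-- ===== SOURCE A (Python) =====
-- from typing import Any, Dict, Iterable, List, Optional, Tuple, Union
--
-- def replace_semicolons_in_literals(query: str, replacement: str) -> str:
--     output: List[str] = []
--     quote: Optional[str] = None
--     line_comment = False
--     block_comment = False
--     i = 0
--     while i < len(query):
--         char = query[i]
--         nxt = query[i + 1] if i + 1 < len(query) else ""
--         if line_comment:
--             output.append(replacement if char == ";" else char)
--             if char == "\n":
--                 line_comment = False
--             i += 1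
--             continue
--         if block_comment:
--             output.append(replacement if char == ";" else char)
--             if char == "*" and nxt == "/":
--                 output.append(nxt)
--                 block_comment = False
--                 i += 2
--             else:
--                 i += 1
--             continue
--         if quote:
--             output.append(replacement if char == ";" else char)
--             if char == quote:
--                 if nxt == quote:
--                     output.append(nxt)
--                     i += 2
--                     continue
--                 quote = None
--             i += 1
--             continue
--         if char in {"'", '"', "`"}:
--             quote = char
--             output.append(char)
--             i += 1
--             continue
--         if char == "-" and nxt == "-":
--             line_comment = True
--             output.extend([char, nxt])
--             i += 2
--             continue
--         if char == "/" and nxt == "*":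
--             block_comment = True
--             output.extend([char, nxt])
--             i += 2
--             continue
--         output.append(char)
--         i += 1
--     return "".join(output)
-- ===== SOURCE B (Python) =====
-- def _end_of_quoted(q, i, quote):
--     n = len(q)
--     while i < n:
--         if q[i] == quote:
--             if i + 1 < n and q[i + 1] == quote:
--                 i += 2
--             else:
--                 return i + 1
--         else:
--             i += 1
--     return n
--
-- def _end_of_line_comment(q, i):
--     n = len(q)
--     while i < n:
--         if q[i] == "\n":
--             return i + 1
--         i += 1
--     return n
--
-- def _end_of_block_comment(q, i):
--     n = len(q)
--     while i < n:
--         if q[i] == "*" and i + 1 < n and q[i + 1] == "/":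
--             return i + 2
--         i += 1
--     return n
--
-- def replace_semicolons_in_literals(query: str, replacement: str) -> str:
--     out = []
--     i, n = 0, len(query)
--     while i < n:
--         c = query[i]
--         if c in "'\"`":
--             j = _end_of_quoted(query, i + 1, c)
--             out.append(c + query[i + 1:j].replace(";", replacement))
--             i = j
--         elif query.startswith("--", i):
--             j = _end_of_line_comment(query, i + 2)
--             out.append("--" + query[i + 2:j].replace(";", replacement))
--             i = j
--         elif query.startswith("/*", i):
--             j = _end_of_block_comment(query, i + 2)
--             out.append("/*" + query[i + 2:j].replace(";", replacement))
--             i = j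
--         else:
--             out.append(c)
--             i += 1
--     return "".join(out)
-- ===== Notes on version B (the rewrite author's own statement) =====
-- stated objective: alternative
-- what changed: Replaced A's per-character state machine with quote/line-comment/block-comment mode flags by a region tokenizer: the main loop dispatches on the opening token, a helper scans to the end of each literal/comment region, and the region's semicolons are replaced wholesale with str.replace.
import Mathlib
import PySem

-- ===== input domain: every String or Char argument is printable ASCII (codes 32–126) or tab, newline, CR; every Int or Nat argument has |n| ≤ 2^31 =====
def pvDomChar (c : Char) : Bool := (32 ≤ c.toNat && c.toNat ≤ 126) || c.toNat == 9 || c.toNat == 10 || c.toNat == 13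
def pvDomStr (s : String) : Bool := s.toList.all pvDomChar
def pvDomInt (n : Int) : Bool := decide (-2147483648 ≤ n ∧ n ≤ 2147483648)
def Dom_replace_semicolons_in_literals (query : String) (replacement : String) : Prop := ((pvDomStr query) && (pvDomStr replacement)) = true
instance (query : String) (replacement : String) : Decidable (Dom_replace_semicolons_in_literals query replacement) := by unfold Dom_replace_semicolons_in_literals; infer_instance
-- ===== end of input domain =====

-- B replaces A's per-character mode-flag state machine by a region tokenizer: it scans
-- each literal/comment region in one helper pass and replaces the semicolons of the
-- region wholesale (objective: alternative / more idiomatic; same O(n) cost).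


-- ===== PORT A =====
-- Literal transliteration of A's while-loop: index i over query becomes structural
-- recursion over the suffix list; the state (quote, line_comment, block_comment) is
-- carried unchanged; branch order is A's; `nxt` is the head of the tail.
def goA (repl : List Char) (quote : Option Char) (lineC : Bool) (blockC : Bool) :
    List Char → List Char
  | [] => []
  | c :: cs =>
    if lineC then
      (if c = ';' then repl else [c]) ++
        goA repl quote (if c = '\n' then false else true) blockC cs
    else if blockC then
      match cs with
      | n :: cs2 =>
        if c = '*' ∧ n = '/' then
          (if c = ';' then repl else [c]) ++ [n] ++ goA repl quote lineC false cs2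
        else
          (if c = ';' then repl else [c]) ++ goA repl quote lineC true (n :: cs2)
      | [] => (if c = ';' then repl else [c]) ++ goA repl quote lineC true []
    else
      match quote with
      | some q =>
        if c = q then
          match cs with
          | n :: cs2 =>
            if n = q then
              (if c = ';' then repl else [c]) ++ [n] ++ goA repl (some q) lineC blockC cs2
            else
              (if c = ';' then repl else [c]) ++ goA repl none lineC blockC (n :: cs2)
          | [] => (if c = ';' then repl else [c]) ++ goA repl none lineC blockC []
        else (if c = ';' then repl else [c]) ++ goA repl (some q) lineC blockC cs
      | none =>
        if c = '\'' ∨ c = '"' ∨ c = '`' then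
          [c] ++ goA repl (some c) lineC blockC cs
        else
          match cs with
          | n :: cs2 =>
            if c = '-' ∧ n = '-' then [c, n] ++ goA repl quote true blockC cs2
            else if c = '/' ∧ n = '*' then [c, n] ++ goA repl quote lineC true cs2
            else [c] ++ goA repl quote lineC blockC (n :: cs2)
          | [] => [c] ++ goA repl quote lineC blockC []
  termination_by l => l.length
  decreasing_by all_goals simp

def replace_semicolons_in_literals (query : String) (replacement : String) : String :=
  String.mk (goA replacement.toList none false false query.toList)

-- ===== PORT B =====
-- Ports of Source B's helper scanners: each index loop over query[i:] becomes recursion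
-- over the suffix list; instead of returning the end index j they return the split
-- (query[i:j].toList, query[j:].toList) — exact by construction on all inputs.
def scanQuoted (q : Char) : List Char → List Char × List Char
  | [] => ([], [])
  | c :: cs =>
    if c = q then
      match cs with
      | n :: cs2 =>
        if n = q then
          let p := scanQuoted q cs2
          (c :: n :: p.1, p.2)
        else ([c], n :: cs2)
      | [] => ([c], [])
    else
      let p := scanQuoted q cs
      (c :: p.1, p.2)
  termination_by l => l.length
  decreasing_by all_goals simp

def scanLine : List Char → List Char × List Char
  | [] => ([], [])
  | c :: cs =>
    if c = '\n' then ([c], cs)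
    else
      let p := scanLine cs
      (c :: p.1, p.2)

def scanBlock : List Char → List Char × List Char
  | [] => ([], [])
  | c :: cs =>
    if c = '*' ∧ cs.head? = some '/' then ([c, '/'], cs.tail)
    else
      let p := scanBlock cs
      (c :: p.1, p.2)

-- region.replace(";", replacement) over a region of chars
def brep (repl : List Char) (l : List Char) : List Char :=
  l.flatMap (fun c => if c = ';' then repl else [c])

-- length bounds on the scanners' rest (used by goB's termination)
theorem scanQuoted_len (q : Char) : ∀ l : List Char, (scanQuoted q l).2.length ≤ l.length := by
  intro l
  induction l using scanQuoted.induct q with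
  | case1 => rw [scanQuoted.eq_def]
  | case2 cs2 ih => rw [scanQuoted.eq_def]; simp; omega
  | case3 n cs2 hn => rw [scanQuoted.eq_def]; simp [hn]
  | case4 => rw [scanQuoted.eq_def]; simp
  | case5 c cs hc ih => rw [scanQuoted.eq_def]; simp [hc]; omega

theorem scanLine_len : ∀ l : List Char, (scanLine l).2.length ≤ l.length := by
  intro l
  induction l with
  | nil => simp [scanLine]
  | cons c cs ih => by_cases h : c = '\n' <;> simp [scanLine, h] <;> omega

theorem scanBlock_len : ∀ l : List Char, (scanBlock l).2.length ≤ l.length := by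
  intro l
  induction l with
  | nil => simp [scanBlock]
  | cons c cs ih =>
    by_cases h : c = '*' ∧ cs.head? = some '/' <;> simp [scanBlock, h]
    · cases cs <;> simp
    · omega

-- Source B's main loop: dispatch on the region opener, scan the whole region, replace
-- its semicolons wholesale, continue after the region.
def goB (repl : List Char) : List Char → List Char
  | [] => []
  | c :: cs =>
    if c = '\'' ∨ c = '"' ∨ c = '`' then
      let p := scanQuoted c cs
      c :: (brep repl p.1 ++ goB repl p.2)
    else if c = '-' ∧ cs.head? = some '-' then
      let p := scanLine cs.tail
      c :: '-' :: (brep repl p.1 ++ goB repl p.2)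
    else if c = '/' ∧ cs.head? = some '*' then
      let p := scanBlock cs.tail
      c :: '*' :: (brep repl p.1 ++ goB repl p.2)
    else c :: goB repl cs
  termination_by l => l.length
  decreasing_by
  · have := scanQuoted_len c cs; simp; omega
  · have := scanLine_len cs.tail; cases cs <;> simp at this ⊢ <;> omega
  · have := scanBlock_len cs.tail; cases cs <;> simp at this ⊢ <;> omega
  · simp

def replace_semicolons_in_literals_alt (query : String) (replacement : String) : String :=
  String.mk (goB replacement.toList query.toList)

-- ===== PRECONDITION & SPEC =====
def Spec_replace_semicolons_in_literals (query : String) (replacement : String) (out : String) : Prop := out = replace_semicolons_in_literals_alt query replacement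
instance (query : String) (replacement : String) (out : String) : Decidable (Spec_replace_semicolons_in_literals query replacement out) := by unfold Spec_replace_semicolons_in_literals; infer_instance

-- ===== CLAIM (what is proved, stated in full; the proofs are below) =====
def Claim_equal_replace_semicolons_in_literals : Prop := ∀ (query : String) (replacement : String), Dom_replace_semicolons_in_literals query replacement → Spec_replace_semicolons_in_literals query replacement (replace_semicolons_in_literals query replacement)

-- ===== LEMMAS AND PROOFS =====

theorem goA_nil (repl : List Char) (q : Option Char) (lC bC : Bool) :
    goA repl q lC bC [] = [] := by rw [goA.eq_def]

-- A in line-comment mode consumes exactly the scanLine region, replacing its semicolons.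
theorem goA_line (repl : List Char) (q : Option Char) :
    ∀ l : List Char, goA repl q true false l =
      brep repl (scanLine l).1 ++ goA repl q false false (scanLine l).2 := by
  intro l
  induction l with
  | nil => rw [goA.eq_def]; simp [scanLine, brep, goA_nil]
  | cons c cs ih =>
    by_cases h : c = '\n'
    · subst h; rw [goA.eq_def]; simp [scanLine, brep]
    · rw [goA.eq_def]; simp [scanLine, h, brep] at ih ⊢
      by_cases hc : c = ';' <;> simp [hc, ih]

-- A in block-comment mode consumes exactly the scanBlock region.
theorem goA_block (repl : List Char) (q : Option Char) :
    ∀ l : List Char, goA repl q false true l =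
      brep repl (scanBlock l).1 ++ goA repl q false false (scanBlock l).2 := by
  intro l
  induction l using scanBlock.induct with
  | case1 => rw [goA.eq_def]; simp [scanBlock, brep, goA_nil]
  | case2 c cs h =>
    obtain ⟨hc, hn⟩ := h
    subst hc
    cases cs with
    | nil => simp at hn
    | cons n cs2 =>
      simp at hn; subst hn
      rw [goA.eq_def]; simp [scanBlock, brep]
  | case3 c cs h ih =>
    rw [goA.eq_def]
    cases cs with
    | nil =>
      simp [scanBlock, brep, goA_nil]
    | cons n cs2 =>
      have hno : ¬(c = '*' ∧ n = '/') := by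
        intro ⟨h1, h2⟩; exact h ⟨h1, by simp [h2]⟩
      simp [scanBlock, h, hno, brep] at ih ⊢
      by_cases hc : c = ';' <;> simp [hc, ih]

-- A in quote mode consumes exactly the scanQuoted region (q is a real quote char, so q ≠ ';').
theorem goA_quote (repl : List Char) (q : Char) (hq : ¬q = ';') :
    ∀ l : List Char, goA repl (some q) false false l =
      brep repl (scanQuoted q l).1 ++ goA repl none false false (scanQuoted q l).2 := by
  intro l
  induction l using scanQuoted.induct q with
  | case1 => rw [goA.eq_def, scanQuoted.eq_def]; simp [brep, goA_nil]
  | case2 cs2 ih =>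
    rw [goA.eq_def, scanQuoted.eq_def]
    simp [hq, brep] at ih ⊢
    simpa [brep] using ih
  | case3 n cs2 hn =>
    rw [goA.eq_def, scanQuoted.eq_def]
    simp [hq, hn, brep]
  | case4 =>
    rw [goA.eq_def, scanQuoted.eq_def]
    simp [hq, brep, goA_nil]
  | case5 c cs hc ih =>
    rw [goA.eq_def, scanQuoted.eq_def]
    simp [hc, brep] at ih ⊢
    by_cases hs : c = ';' <;> simp [hs, ih]

theorem goA_eq_goB (repl : List Char) : ∀ l : List Char, goA repl none false false l = goB repl l := by
  intro l
  induction l using goB.induct with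
  | case1 => rw [goA.eq_def]; rw [goB.eq_def]
  | case2 c cs h p ih =>
    have hq : ¬c = ';' := by rcases h with h | h | h <;> subst h <;> decide
    have ih' : goA repl none false false (scanQuoted c cs).2 = goB repl (scanQuoted c cs).2 := ih
    rw [goA.eq_def, goB.eq_def]
    simp only [if_pos h]
    rw [goA_quote repl c hq cs, ih']
    simp
  | case3 c cs h1 h2 p ih =>
    have ih' : goA repl none false false (scanLine cs.tail).2 = goB repl (scanLine cs.tail).2 := ih
    obtain ⟨hc, hn⟩ := h2
    subst hc
    cases cs with
    | nil => simp at hn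
    | cons n cs2 =>
      simp at hn; subst hn
      rw [goA.eq_def, goB.eq_def]
      simp only [if_neg h1]
      simp
      rw [goA_line repl none cs2]
      simpa using ih'
  | case4 c cs h1 h2 h3 p ih =>
    have ih' : goA repl none false false (scanBlock cs.tail).2 = goB repl (scanBlock cs.tail).2 := ih
    obtain ⟨hc, hn⟩ := h3
    subst hc
    cases cs with
    | nil => simp at hn
    | cons n cs2 =>
      simp at hn; subst hn
      rw [goA.eq_def, goB.eq_def]
      simp only [if_neg h1, if_neg h2]
      simp
      rw [goA_block repl none cs2]
      simpa using ih'
  | case5 c cs h1 h2 h3 ih =>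
    rw [goA.eq_def, goB.eq_def]
    simp only [if_neg h1, if_neg h2, if_neg h3]
    rw [← ih]
    cases cs with
    | nil => simp [h1]
    | cons n cs2 =>
      have hd : ¬(c = '-' ∧ n = '-') := by
        intro ⟨a, b⟩; exact h2 ⟨a, by simp [b]⟩
      have hb : ¬(c = '/' ∧ n = '*') := by
        intro ⟨a, b⟩; exact h3 ⟨a, by simp [b]⟩
      simp [h1, hd, hb]

-- ===== VERDICT (by name: the statement is the Claim_ definition above) =====
theorem replace_semicolons_in_literals_spec : Claim_equal_replace_semicolons_in_literals := by
  intro query replacement _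
  unfold Spec_replace_semicolons_in_literals replace_semicolons_in_literals replace_semicolons_in_literals_alt
  rw [goA_eq_goB]
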